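-- pv_equiv track=rewrite | github.com/nmachinesteve/Programacion-Paralela-22-23 | Practica 1/practica1.py | cmin
-- ===== SOURCE A (Python) =====
-- def cmin(prods):
--     n = len(prods)
--     C = []
--     maximo = max(prods)
--
--     for i in range(n):
--         if prods[i] >= 0 and prods[i] < maximo:
--             v = prods[i]
--             C.append(v)
--
--     minimo = min(C)
--     index = C.index(minimo)
--
--     return minimo, index
-- ===== SOURCE B (Python) =====
-- def cmin(prods):
--     maximo = max(prods)
--     minimo = None
--     index = -1
--     count = 0
--     for v in prods:
--         if 0 <= v < maximo:
--             if minimo is None or v < minimo: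
--                 minimo = v
--                 index = count
--             count += 1
--     if minimo is None:
--         raise ValueError("min() arg is an empty sequence")
--     return minimo, index
-- ===== Notes on version B (the rewrite author's own statement) =====
-- stated objective: alternative
-- what changed: single pass maintaining running minimum, its filtered-position index and a pass-count, instead of building the intermediate filtered list C and scanning it twice more with min() and .index()
import Mathlib
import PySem

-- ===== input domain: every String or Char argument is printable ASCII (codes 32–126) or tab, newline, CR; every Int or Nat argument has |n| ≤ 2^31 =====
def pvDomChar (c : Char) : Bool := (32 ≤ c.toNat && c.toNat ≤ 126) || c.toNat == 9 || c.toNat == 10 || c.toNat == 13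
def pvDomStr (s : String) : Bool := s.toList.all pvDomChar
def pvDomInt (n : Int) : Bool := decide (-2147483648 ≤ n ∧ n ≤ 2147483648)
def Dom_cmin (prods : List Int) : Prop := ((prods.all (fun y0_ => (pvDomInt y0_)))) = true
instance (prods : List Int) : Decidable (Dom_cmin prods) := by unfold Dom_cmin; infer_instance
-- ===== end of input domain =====

-- B replaces A's intermediate filtered list plus the min()/.index() rescans by one pass with a
-- running minimum, its filtered-position index and a pass-count (alternative decomposition).

-- ===== PORT A =====
def cmin (prods : List Int) : Int × Int :=
  let n : Int := prods.length
  let maximo := (PySem.List.max? prods (fun x => x)).getD 0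
  let C := (PySem.List.pyRange 0 n 1).foldl
    (fun C i =>
      if PySem.List.pyGetD prods i 0 ≥ 0 ∧ PySem.List.pyGetD prods i 0 < maximo then
        C ++ [PySem.List.pyGetD prods i 0]
      else C) []
  let minimo := (PySem.List.min? C (fun x => x)).getD 0
  let index : Int := ((PySem.List.index? C minimo).getD 0 : Nat)
  (minimo, index)

-- ===== PORT B =====
def cmin_alt (prods : List Int) : Int × Int :=
  let maximo := (PySem.List.max? prods (fun x => x)).getD 0
  let st := prods.foldl
    (fun (st : Option Int × Int × Int) v =>
      if 0 ≤ v ∧ v < maximo then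
        match st with
        | (none, _, count) => (some v, count, count + 1)
        | (some m, index, count) =>
          if v < m then (some v, count, count + 1) else (some m, index, count + 1)
      else st)
    (none, -1, 0)
  match st with
  | (some m, index, _) => (m, index)
  | (none, _, _) => (0, 0)

-- ===== PRECONDITION & SPEC =====
-- Pre_ excludes exactly the inputs where Python A raises ValueError: the empty list, and lists
-- whose filtered list C comes out empty.  C is nonempty iff some element v has 0 <= v and
-- v < some other element w of the list; on every excluded input B raises the same ValueError.
def Pre_cmin (prods : List Int) : Prop := ∃ v ∈ prods, ∃ w ∈ prods, 0 ≤ v ∧ v < w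
instance (prods : List Int) : Decidable (Pre_cmin prods) := by unfold Pre_cmin; infer_instance
def pvWitness_cmin : List Int := [0, 5]

def Spec_cmin (prods : List Int) (out : Int × Int) : Prop := out = cmin_alt prods
instance (prods : List Int) (out : Int × Int) : Decidable (Spec_cmin prods out) := by unfold Spec_cmin; infer_instance

-- ===== CLAIM (what is proved, stated in full; the proofs are below) =====
def Claim_equal_cmin : Prop := ∀ (prods : List Int), Dom_cmin prods → Pre_cmin prods → Spec_cmin prods (cmin prods)

-- ===== LEMMAS AND PROOFS =====

lemma min?_id_append_singleton (C : List Int) (m v : Int)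
    (h : PySem.List.min? C (fun x => x) = some m) :
    PySem.List.min? (C ++ [v]) (fun x => x) = some (min m v) := by
  cases C with
  | nil => simp [PySem.List.min?] at h
  | cons c t =>
    rw [PySem.List.min?_id_cons] at h
    have ht : List.foldl min c t = m := Option.some.inj h
    show PySem.List.min? (c :: (t ++ [v])) (fun x => x) = some (min m v)
    rw [PySem.List.min?_id_cons, List.foldl_append, ht]
    simp

-- loop invariant for B's fold over the filtered list
lemma loopInv (C : List Int) :
    C.foldl
      (fun (st : Option Int × Int × Int) v =>
        match st with
        | (none, _, count) => (some v, count, count + 1)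
        | (some m, index, count) =>
          if v < m then (some v, count, count + 1) else (some m, index, count + 1))
      (none, -1, 0)
    = match PySem.List.min? C (fun x => x) with
      | none => ((none : Option Int), (-1 : Int), (0 : Int))
      | some m => (some m, (((PySem.List.index? C m).getD 0 : Nat) : Int), (C.length : Int)) := by
  induction C using List.reverseRecOn with
  | nil => simp [PySem.List.min?]
  | append_singleton C v ih =>
    rw [List.foldl_append, ih]
    cases hm : PySem.List.min? C (fun x => x) with
    | none =>
      have hC : C = [] := (PySem.List.min?_eq_none_iff C _).mp hm
      subst hC
      simp [PySem.List.min?_id_cons]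
    | some m =>
      have hmem : m ∈ C := PySem.List.min?_mem hm
      have hmin : ∀ y ∈ C, m ≤ y := fun y hy => PySem.List.min?_isMin hm y hy
      rw [min?_id_append_singleton C m v hm]
      simp only [List.foldl_cons, List.foldl_nil]
      by_cases hv : v < m
      · have hnotin : v ∉ C := fun hvC => absurd (hmin v hvC) (by omega)
        have hmv : min m v = v := by omega
        rw [hmv, PySem.List.index?_append_singleton_self C v hnotin]
        simp [hv]
      · have hmv : min m v = m := by omega
        rw [hmv, PySem.List.index?_append_of_mem _ hmem]
        simp [hv]

theorem cmin_spec_general (prods : List Int) : cmin prods = cmin_alt prods := by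
  unfold cmin cmin_alt
  simp only []
  rw [show ((prods.length : Int)) = PySem.List.len prods from rfl]
  rw [PySem.List.foldl_pyRange_zero_pyGetD prods 0
        (fun C v => if v ≥ 0 ∧ v < (PySem.List.max? prods (fun x => x)).getD 0 then C ++ [v] else C) []]
  rw [PySem.List.foldl_ite_eq_foldl_filter
        (fun v => 0 ≤ v ∧ v < (PySem.List.max? prods (fun x => x)).getD 0)
        (fun (st : Option Int × Int × Int) v =>
          match st with
          | (none, _, count) => (some v, count, count + 1)
          | (some m, index, count) =>
            if v < m then (some v, count, count + 1) else (some m, index, count + 1))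
        prods (none, -1, 0)]
  rw [PySem.List.foldl_append_ite_eq_filter
        (fun v => v ≥ 0 ∧ v < (PySem.List.max? prods (fun x => x)).getD 0) prods []]
  simp only [ge_iff_le, List.nil_append]
  rw [loopInv]
  cases hm : PySem.List.min? (prods.filter
      (fun v => decide (0 ≤ v ∧ v < (PySem.List.max? prods (fun x => x)).getD 0))) (fun x => x) with
  | none =>
    have hC' := (PySem.List.min?_eq_none_iff _ _).mp hm
    simp only [Bool.decide_and] at hC'
    simp [PySem.List.index?, hC']
  | some m =>
    simp

-- ===== VERDICT (by name: the statement is the Claim_ definition above) =====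

theorem cmin_spec : Claim_equal_cmin := by
  unfold Claim_equal_cmin Spec_cmin
  intro prods _ _
  exact cmin_spec_general prods
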